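-- pv_equiv track=rewrite | github.com/alex-zaq/npp-load-factor-optimization | src/npp_load_factor_calculator/utilites.py | zero_inner_ones
-- ===== SOURCE A (Python) =====
-- def zero_inner_ones(arr):
--
--     n = len(arr)
--     result = [0] * n  # Создаем новый массив, заполненный нулями, той же длины
--     i = 0
--     while i < n:
--         if arr[i] == 1:
--             # Найдено начало блока единиц
--             result[i] = 1  # Первая единица в блоке остается единицей
--
--             # Находим конец блока единиц
--             end_of_block_index = i
--             while end_of_block_index + 1 < n and arr[end_of_block_index + 1] == 1:
--                 end_of_block_index += 1
--
--             # Если есть позиция сразу после блока единиц, ставим там единицу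
--             if end_of_block_index + 1 < n:
--                 result[end_of_block_index + 1] = 1
--
--             # Перемещаем указатель 'i' за текущий блок, чтобы продолжить поиск
--             i = end_of_block_index + 1
--         else:
--             # Если текущий элемент 0, он остается 0 (поскольку result уже инициализирован нулями)
--             i += 1
--     return result
-- ===== SOURCE B (Python) =====
-- def zero_inner_ones(arr):
--     out = []
--     prev = None
--     for x in arr:
--         start = (x == 1) and (prev != 1)
--         after = (x != 1) and (prev == 1)
--         out.append(1 if (start or after) else 0)
--         prev = x
--     return out
-- ===== Notes on version B (the rewrite author's own statement) =====
-- stated objective: simpler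
-- what changed: Replaced the nested while loop with pointer jumps and in-place marking of a preallocated array by a single forward pass that compares each element to its predecessor and appends 0/1.
import Mathlib
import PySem

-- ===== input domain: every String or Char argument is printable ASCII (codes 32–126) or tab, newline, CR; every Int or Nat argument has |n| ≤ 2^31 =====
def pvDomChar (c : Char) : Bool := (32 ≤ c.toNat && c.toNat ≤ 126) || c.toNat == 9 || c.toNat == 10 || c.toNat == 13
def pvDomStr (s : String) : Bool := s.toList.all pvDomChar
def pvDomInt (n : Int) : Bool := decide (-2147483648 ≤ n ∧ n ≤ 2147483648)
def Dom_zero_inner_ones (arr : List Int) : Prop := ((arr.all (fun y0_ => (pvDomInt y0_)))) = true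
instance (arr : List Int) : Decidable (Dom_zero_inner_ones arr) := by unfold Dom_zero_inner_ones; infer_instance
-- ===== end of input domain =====

-- B replaces A's nested while loop (block scan + pointer jump, marking a preallocated
-- zero array) with one forward pass comparing each element to its predecessor (simpler).

-- ===== PORT A =====
-- inner 'while end_of_block_index + 1 < n and arr[end_of_block_index + 1] == 1'
def ziEnd (arr : List Int) (n e : Nat) : Nat :=
  if e + 1 < n ∧ arr.getD (e + 1) 0 = 1 then ziEnd arr n (e + 1) else e
termination_by n - e
decreasing_by omega

-- needed by ziLoop's termination proof (cited in its decreasing_by)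
theorem ziEnd_ge (arr : List Int) (n e : Nat) : e ≤ ziEnd arr n e := by
  fun_induction ziEnd <;> omega

-- outer 'while i < n'; indices are Nat (Python's i, n are nonnegative throughout)
def ziLoop (arr : List Int) (n : Nat) (result : List Int) (i : Nat) : List Int :=
  if i < n then
    if arr.getD i 0 = 1 then
      let r1 := result.set i 1
      let e := ziEnd arr n i
      let r2 := if e + 1 < n then r1.set (e + 1) 1 else r1
      ziLoop arr n r2 (e + 1)
    else
      ziLoop arr n result (i + 1)
  else result
termination_by n - i
decreasing_by
  · have := ziEnd_ge arr n i; omega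
  · omega

def zero_inner_ones (arr : List Int) : List Int :=
  ziLoop arr arr.length (List.replicate arr.length 0) 0

-- ===== PORT B =====
-- the for loop of Source B: prev is None before the first element
def altLoop (l : List Int) (prev : Option Int) : List Int :=
  match l with
  | [] => []
  | x :: rest =>
    (if (x = 1 ∧ prev ≠ some 1) ∨ (x ≠ 1 ∧ prev = some 1) then (1 : Int) else 0)
      :: altLoop rest (some x)

def zero_inner_ones_alt (arr : List Int) : List Int := altLoop arr none

-- ===== PRECONDITION & SPEC =====
def Spec_zero_inner_ones (arr : List Int) (out : List Int) : Prop := out = zero_inner_ones_alt arr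
instance (arr : List Int) (out : List Int) : Decidable (Spec_zero_inner_ones arr out) := by unfold Spec_zero_inner_ones; infer_instance

-- ===== CLAIM (what is proved, stated in full; the proofs are below) =====
def Claim_equal_zero_inner_ones : Prop := ∀ (arr : List Int), Dom_zero_inner_ones arr → Spec_zero_inner_ones arr (zero_inner_ones arr)

-- ===== LEMMAS AND PROOFS =====

-- the intended value at position k (B's rule, phrased by index)
def pvMark (arr : List Int) (k : Nat) : Int :=
  if (arr.getD k 0 = 1 ∧ (k = 0 ∨ arr.getD (k - 1) 0 ≠ 1)) ∨
     (arr.getD k 0 ≠ 1 ∧ 0 < k ∧ arr.getD (k - 1) 0 = 1) then 1 else 0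

theorem altLoop_length (l : List Int) (prev : Option Int) : (altLoop l prev).length = l.length := by
  induction l generalizing prev with
  | nil => rfl
  | cons x rest ih => simp [altLoop, ih]

theorem altLoop_getD (l : List Int) : ∀ (prev : Option Int) (k : Nat), k < l.length →
    (altLoop l prev).getD k 0 =
      if (l.getD k 0 = 1 ∧ (if k = 0 then prev else some (l.getD (k - 1) 0)) ≠ some 1) ∨
         (l.getD k 0 ≠ 1 ∧ (if k = 0 then prev else some (l.getD (k - 1) 0)) = some 1)
      then 1 else 0 := by
  induction l with
  | nil => intro _ k h; simp at h
  | cons x rest ih =>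
    intro prev k hk
    cases k with
    | zero => simp [altLoop]
    | succ k =>
      have hk' : k < rest.length := by simpa using hk
      have h := ih (some x) k hk'
      cases k with
      | zero => simpa [altLoop] using h
      | succ m => simpa [altLoop] using h

theorem alt_getD_mark (arr : List Int) (k : Nat) (hk : k < arr.length) :
    (zero_inner_ones_alt arr).getD k 0 = pvMark arr k := by
  have h := altLoop_getD arr none k hk
  unfold zero_inner_ones_alt pvMark
  rw [h]
  cases k with
  | zero => simp
  | succ m =>
    simp only [Nat.succ_ne_zero, Option.some.injEq, reduceIte]
    by_cases h1 : arr.getD (m + 1) 0 = 1 <;> by_cases h2 : arr.getD m 0 = 1 <;>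
      simp [h1, h2]

theorem ziEnd_lt (arr : List Int) (n e : Nat) (h : e < n) : ziEnd arr n e < n := by
  fun_induction ziEnd with
  | case1 _ hcond ih => exact ih (by omega)
  | case2 => exact h

theorem ziEnd_ones (arr : List Int) (n e : Nat) (he : arr.getD e 0 = 1) :
    ∀ k, e ≤ k → k ≤ ziEnd arr n e → arr.getD k 0 = 1 := by
  fun_induction ziEnd with
  | case1 e hcond ih =>
    intro k h1 h2
    rcases Nat.eq_or_lt_of_le h1 with rfl | h1'
    · exact he
    · exact ih hcond.2 k (by omega) h2
  | case2 e hcond =>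
    intro k h1 h2
    have : k = e := by omega
    simpa [this] using he

theorem ziEnd_stop (arr : List Int) (n e : Nat) (h : ziEnd arr n e + 1 < n) :
    arr.getD (ziEnd arr n e + 1) 0 ≠ 1 := by
  fun_induction ziEnd with
  | case1 _ hcond ih => exact ih h
  | case2 e hcond =>
    intro habs
    exact hcond ⟨h, habs⟩

theorem getD_out (l : List Int) (k : Nat) (h : l.length ≤ k) : l.getD k 0 = 0 := by
  simp [List.getD, List.getElem?_eq_none (by omega : l.length ≤ k)]

theorem getD_set_self (l : List Int) (i : Nat) (a : Int) (h : i < l.length) :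
    (l.set i a).getD i 0 = a := by
  simp [List.getD, h]

theorem getD_set_ne (l : List Int) (i j : Nat) (a : Int) (h : i ≠ j) :
    (l.set i a).getD j 0 = l.getD j 0 := by
  simp [List.getD, List.getElem?_set_ne h]

theorem getD_replicate0 (n k : Nat) : (List.replicate n (0 : Int)).getD k 0 = 0 := by
  simp [List.getD, List.getElem?_replicate]
  split <;> rfl

theorem ziLoop_spec (arr : List Int) (n : Nat) (hn : n = arr.length) :
    ∀ (m : Nat) (result : List Int) (i : Nat), n - i ≤ m →
    result.length = n →
    (i < n →
      ((i = 0 ∨ arr.getD (i - 1) 0 ≠ 1) ∧ result.getD i 0 = 0) ∨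
      (arr.getD i 0 ≠ 1 ∧ result.getD i 0 = 1 ∧ pvMark arr i = 1)) →
    (∀ k, i < k → k < n → result.getD k 0 = 0) →
    (ziLoop arr n result i).length = n ∧
    (∀ k, k < n → (ziLoop arr n result i).getD k 0 =
      if k < i then result.getD k 0 else pvMark arr k) := by
  intro m
  induction m with
  | zero =>
    intro result i hm hlen _ _
    have hin : ¬ i < n := by omega
    rw [ziLoop, if_neg hin]
    exact ⟨hlen, fun k hk => by rw [if_pos (by omega)]⟩
  | succ m ih =>
    intro result i hm hlen hE hZ
    by_cases hin : i < n
    · by_cases h1 : arr.getD i 0 = 1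
      · -- block branch
        rcases hE hin with ⟨hE1, hri⟩ | ⟨hne, _, _⟩
        · set e := ziEnd arr n i with he
          have hie : i ≤ e := ziEnd_ge arr n i
          have hen : e < n := ziEnd_lt arr n i hin
          have hones : ∀ k, i ≤ k → k ≤ e → arr.getD k 0 = 1 := ziEnd_ones arr n i h1
          have hmi : pvMark arr i = 1 := by unfold pvMark; rw [if_pos (Or.inl ⟨h1, hE1⟩)]
          set r1 := result.set i 1 with hr1
          set r2 := (if e + 1 < n then r1.set (e + 1) 1 else r1) with hr2
          have hr2len : r2.length = n := by
            rw [hr2, hr1]; split <;> simp [hlen]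
          have hr2get : ∀ k, k ≠ e + 1 → r2.getD k 0 = r1.getD k 0 := by
            intro k hk
            rw [hr2]; split
            · exact getD_set_ne _ _ _ _ (fun h => hk h.symm)
            · rfl
          have step : ziLoop arr n result i = ziLoop arr n r2 (e + 1) := by
            rw [ziLoop, if_pos hin, if_pos h1]
          have hcall := ih r2 (e + 1) (by omega) hr2len
            (by
              intro h1n
              right
              have hstop := ziEnd_stop arr n i (by rw [← he]; exact h1n)
              rw [← he] at hstop
              refine ⟨hstop, ?_, ?_⟩
              · rw [hr2, if_pos h1n]
                exact getD_set_self r1 (e + 1) 1 (by rw [hr1]; simp [hlen]; omega)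
              · unfold pvMark
                rw [if_pos (Or.inr ⟨hstop, by omega, by simpa using hones e hie le_rfl⟩)])
            (by
              intro k hk1 hk2
              rw [hr2get k (by omega), hr1, getD_set_ne _ _ _ _ (by omega)]
              exact hZ k (by omega) hk2)
          refine ⟨by rw [step]; exact hcall.1, ?_⟩
          intro k hk
          rw [step, hcall.2 k hk]
          by_cases hki : k < i
          · rw [if_pos (by omega), if_pos hki, hr2get k (by omega), hr1,
              getD_set_ne _ _ _ _ (by omega)]
          · by_cases hke : k < e + 1
            · rw [if_pos hke, if_neg hki]
              rcases Nat.eq_or_lt_of_le (Nat.le_of_not_lt hki) with heq | hik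
              · subst heq
                rw [hr2get i (by omega), hr1, getD_set_self _ _ _ (by omega), hmi]
              · -- i < k ≤ e : inner one, mark 0
                have hk1 : arr.getD k 0 = 1 := hones k (by omega) (by omega)
                have hkm1 : arr.getD (k - 1) 0 = 1 := hones (k - 1) (by omega) (by omega)
                have : pvMark arr k = 0 := by
                  unfold pvMark
                  rw [if_neg]
                  rintro (⟨_, h | h⟩ | ⟨h, _⟩) <;> omega
                rw [this, hr2get k (by omega), hr1, getD_set_ne _ _ _ _ (by omega),
                  hZ k (by omega) hk]
            · rw [if_neg hke, if_neg hki]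
        · exact absurd h1 hne
      · -- else branch
        have step : ziLoop arr n result i = ziLoop arr n result (i + 1) := by
          rw [ziLoop, if_pos hin, if_neg h1]
        have hmi : pvMark arr i = result.getD i 0 := by
          rcases hE hin with ⟨hE1, hri⟩ | ⟨_, hri, hm1⟩
          · rw [hri]; unfold pvMark
            rw [if_neg]
            rintro (⟨h, _⟩ | ⟨_, hpos, hprev⟩)
            · exact h1 h
            · rcases hE1 with h | h
              · omega
              · exact h hprev
          · rw [hri, hm1]
        have hcall := ih result (i + 1) (by omega) hlen
          (by
            intro _
            left
            refine ⟨Or.inr (by simpa using h1), ?_⟩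
            by_cases h2 : i + 1 < n
            · exact hZ (i + 1) (by omega) h2
            · exact getD_out result (i + 1) (by omega))
          (fun k hk1 hk2 => hZ k (by omega) hk2)
        refine ⟨by rw [step]; exact hcall.1, ?_⟩
        intro k hk
        rw [step, hcall.2 k hk]
        by_cases hki : k < i
        · rw [if_pos (by omega), if_pos hki]
        · by_cases hki1 : k < i + 1
          · have : k = i := by omega
            subst this
            rw [if_pos hki1, if_neg hki, hmi]
          · rw [if_neg hki1, if_neg hki]
    · rw [ziLoop, if_neg hin]
      exact ⟨hlen, fun k hk => by rw [if_pos (by omega)]⟩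

-- ===== VERDICT (by name: the statement is the Claim_ definition above) =====
theorem zero_inner_ones_spec : Claim_equal_zero_inner_ones := by
  intro arr _
  unfold Spec_zero_inner_ones zero_inner_ones
  set n := arr.length with hn
  have h := ziLoop_spec arr n rfl n (List.replicate n 0) 0 (by omega)
    (by simp)
    (by
      intro h0
      left
      exact ⟨Or.inl rfl, getD_replicate0 n 0⟩)
    (by intro k _ hk; exact getD_replicate0 n k)
  have hlenA : (ziLoop arr n (List.replicate n 0) 0).length = n := h.1
  have hlenB : (zero_inner_ones_alt arr).length = n := altLoop_length arr none
  apply List.ext_getElem (by omega)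
  intro k hk1 hk2
  have hkn : k < n := by omega
  have hA : (ziLoop arr n (List.replicate n 0) 0).getD k 0 = pvMark arr k := by
    rw [h.2 k hkn]; simp
  have hB := alt_getD_mark arr k (by omega)
  have hA' : (ziLoop arr n (List.replicate n 0) 0).getD k 0 =
      (ziLoop arr n (List.replicate n 0) 0)[k] := by
    simp [List.getD, List.getElem?_eq_getElem hk1]
  have hB' : (zero_inner_ones_alt arr).getD k 0 = (zero_inner_ones_alt arr)[k] := by
    simp [List.getD, List.getElem?_eq_getElem hk2]
  rw [← hA', ← hB', hA, hB]
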